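-- pv_equiv track=rewrite | github.com/manas-17045/LeetcodeSolutions | Leetcode 3601-3700/3699/3699.py | zigZagArrays
-- ===== SOURCE A (Python) =====
-- def zigZagArrays(n: int, l: int, r: int) -> int:
--     """
--     Calculates the number of zigzag arrays of length n with elements in the range [l, r].
--
--     Args:
--         n (int): The desired length of the zigzag array.
--         l (int): The lower bound of the elements in the array (inclusive).
--         r (int): The upper bound of the elements in the array (inclusive).
--
--     Returns:
--         int: The number of zigzag arrays modulo 10^9 + 7.
--     """
--     mod = 10**9 + 7
--     m = r - l + 1
--
--     up = [0] * m
--     down = [0] * m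
--
--     for i in range(m):
--         up[i] = i
--         down[i] = m - 1 - i
--
--     for _ in range(3, n + 1):
--         newUp = [0] * m
--         newDown = [0] * m
--
--         currentSum = 0
--         for i in range(m):
--             newUp[i] = currentSum
--             currentSum = (currentSum + down[i]) % mod
--
--         currentSum = 0
--         for i in range(m - 1, -1, -1):
--             newDown[i] = currentSum
--             currentSum = (currentSum + up[i]) % mod
--
--         up = newUp
--         down = newDown
--
--     total = (sum(up) + sum(down)) % mod
--     return total
-- ===== SOURCE B (Python) =====
-- def zigZagArrays(n: int, l: int, r: int) -> int:
--     # Single-vector DP: the classical "down" vector is always the reverse of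
--     # "up", so each step builds the new vector as [0] followed by the inclusive
--     # running sums of v[1:] scanned right-to-left (new[i] = suffix sum of v
--     # starting at m-i), one pass, no reversal of the state, answer = 2*sum(v).
--     mod = 10**9 + 7
--     m = r - l + 1
--     if m <= 0:
--         return 0
--     v = list(range(m))
--     for _ in range(2, n):
--         acc = 0
--         out = [0]
--         for x in v[:0:-1]:
--             acc = (acc + x) % mod
--             out.append(acc)
--         v = out
--     return 2 * sum(v) % mod
-- ===== Notes on version B (the rewrite author's own statement) =====
-- stated objective: alternative
-- what changed: B drops the second DP vector (the 'down' vector is always the reverse of 'up') and replaces A's two prefix-sum passes per step by one right-to-left pass that emits 0 followed by the inclusive running suffix sums of the tail, returning twice one vector's sum; an empty range returns 0 immediately.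
import Mathlib
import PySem

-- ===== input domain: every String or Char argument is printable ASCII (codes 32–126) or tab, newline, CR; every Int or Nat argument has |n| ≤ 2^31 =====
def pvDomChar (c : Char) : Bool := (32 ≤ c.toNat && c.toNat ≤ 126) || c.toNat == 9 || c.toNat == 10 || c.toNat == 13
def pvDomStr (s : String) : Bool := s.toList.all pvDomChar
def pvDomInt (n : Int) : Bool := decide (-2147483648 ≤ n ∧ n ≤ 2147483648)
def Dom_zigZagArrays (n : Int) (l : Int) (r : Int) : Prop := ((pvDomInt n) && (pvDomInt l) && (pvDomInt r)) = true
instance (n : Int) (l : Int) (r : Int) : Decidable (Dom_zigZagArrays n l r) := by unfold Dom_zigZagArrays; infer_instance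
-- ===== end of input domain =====

-- B keeps a single DP vector and builds each new vector as 0 followed by the
-- inclusive running sums of the tail scanned right-to-left (the "down" vector
-- of the two-vector DP is provably the reverse of "up"): an alternative
-- single-vector, single-pass formulation; answer = twice one vector's sum.


-- ===== PORT A =====
-- inner loop 'for i in range(m): newUp[i] = currentSum; currentSum = (currentSum + down[i]) % mod'
-- (the successive writes newUp[0..m-1] are collected front-first: cons + final reverse)
def pvStepA (M : Int) (xs : List Int) : List Int :=
  (xs.foldl (fun (p : Int × List Int) d => ((p.1 + d) % M, p.1 :: p.2)) (0, [])).2.reverse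

-- outer loop 'for _ in range(3, n + 1)': one iteration rebuilds (up, down);
-- the downward i-loop writes newDown back-to-front, i.e. it is pvStepA on up reversed, then reversed.
def pvLoopA (M : Int) : Nat → List Int × List Int → List Int × List Int
  | 0, st => st
  | k + 1, st => pvLoopA M k (pvStepA M st.2, (pvStepA M st.1.reverse).reverse)

def zigZagArrays (n : Int) (l : Int) (r : Int) : Int :=
  let M : Int := 1000000007
  let m : Int := r - l + 1
  let up : List Int := (List.range m.toNat).map (fun i => Int.ofNat i)
  let down : List Int := (List.range m.toNat).map (fun i => m - 1 - Int.ofNat i)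
  let st := pvLoopA M (n + 1 - 3).toNat (up, down)
  (st.1.foldl (fun a x => a + x) 0 + st.2.foldl (fun a x => a + x) 0) % M

-- ===== PORT B =====
-- 'acc = 0; for x in v[:0:-1]: acc = (acc + x) % mod; out.append(acc)'
-- pvSuffix M acc ys = the successive appended values (inclusive running mod-sums of ys)
-- (the appended values are collected front-first: cons + final reverse)
def pvSuffixGo (M : Int) (a : Int) (acc : List Int) : List Int → List Int
  | [] => acc
  | x :: xs => pvSuffixGo M ((a + x) % M) (((a + x) % M) :: acc) xs

def pvSuffix (M : Int) (a : Int) (xs : List Int) : List Int :=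
  (pvSuffixGo M a [] xs).reverse

-- outer loop 'for _ in range(2, n)'; v[:0:-1] is v[1:] reversed, out starts as [0]
def pvIterB (M : Int) : Nat → List Int → List Int
  | 0, v => v
  | k + 1, v => pvIterB M k (0 :: pvSuffix M 0 (v.drop 1).reverse)

def zigZagArrays_alt (n : Int) (l : Int) (r : Int) : Int :=
  let M : Int := 1000000007
  let m : Int := r - l + 1
  if m ≤ 0 then 0
  else 2 * ((pvIterB M (n - 2).toNat ((List.range m.toNat).map (fun i => Int.ofNat i))).foldl (fun a x => a + x) 0) % M

-- ===== PRECONDITION & SPEC =====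
def Spec_zigZagArrays (n : Int) (l : Int) (r : Int) (out : Int) : Prop := out = zigZagArrays_alt n l r
instance (n : Int) (l : Int) (r : Int) (out : Int) : Decidable (Spec_zigZagArrays n l r out) := by unfold Spec_zigZagArrays; infer_instance

-- ===== CLAIM =====
def Claim_equal_zigZagArrays : Prop := ∀ (n : Int) (l : Int) (r : Int), Dom_zigZagArrays n l r → Spec_zigZagArrays n l r (zigZagArrays n l r)

-- ===== LEMMAS AND PROOFS =====

-- the collected exclusive prefix sums of xs ++ [z] are a, then the inclusive running sums of xs from a
lemma pvSuffixGo_acc (M : Int) (xs : List Int) (a : Int) (acc : List Int) :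
    pvSuffixGo M a acc xs = pvSuffixGo M a [] xs ++ acc := by
  induction xs generalizing a acc with
  | nil => rfl
  | cons x xs ih =>
      simp only [pvSuffixGo]
      rw [ih, ih ((a + x) % M) [(a + x) % M]]
      simp

lemma pvSuffix_nil (M : Int) (a : Int) : pvSuffix M a [] = [] := rfl

lemma pvSuffix_cons (M : Int) (a x : Int) (xs : List Int) :
    pvSuffix M a (x :: xs) = ((a + x) % M) :: pvSuffix M ((a + x) % M) xs := by
  simp only [pvSuffix, pvSuffixGo]
  rw [pvSuffixGo_acc]
  simp

lemma pvFold_collect (M : Int) (xs : List Int) (z a : Int) (acc : List Int) :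
    ((xs ++ [z]).foldl (fun (p : Int × List Int) d => ((p.1 + d) % M, p.1 :: p.2)) (a, acc)).2.reverse
      = acc.reverse ++ a :: pvSuffix M a xs := by
  induction xs generalizing a acc with
  | nil => simp [pvSuffix_nil]
  | cons x xs ih =>
      simp only [List.cons_append, List.foldl_cons, pvSuffix_cons]
      rw [ih]
      simp

-- A's inner pass on v.reverse equals B's step on v (for nonempty v)
lemma pvStep_eq (M : Int) (h : Int) (t : List Int) :
    pvStepA M ((h :: t).reverse) = 0 :: pvSuffix M 0 ((h :: t).drop 1).reverse := by
  simp only [List.reverse_cons, List.drop_succ_cons, List.drop_zero, pvStepA]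
  rw [pvFold_collect]
  simp

-- invariant: starting from (v, v.reverse) with v ≠ [], A's loop state stays (w, w.reverse)
-- with w the B-loop vector
lemma pvLoop_inv (M : Int) (k : Nat) (v : List Int) (hv : v ≠ []) :
    pvLoopA M k (v, v.reverse) = (pvIterB M k v, (pvIterB M k v).reverse) := by
  induction k generalizing v with
  | zero => rfl
  | succ k ih =>
      obtain ⟨h, t, rfl⟩ := List.exists_cons_of_ne_nil hv
      simp only [pvLoopA, pvIterB]
      rw [pvStep_eq]
      exact ih _ (by simp)

-- the empty state is a fixed point of A's loop
lemma pvLoop_nil (M : Int) (k : Nat) : pvLoopA M k ([], []) = ([], []) := by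
  induction k with
  | zero => rfl
  | succ k ih => simpa [pvLoopA, pvStepA] using ih

lemma pv_foldl_sum (xs : List Int) : xs.foldl (fun a x => a + x) 0 = xs.sum :=
  (List.sum_eq_foldl (l := xs)).symm

-- initial down vector is the reverse of the initial up vector
lemma pv_init_rev (k : Nat) (m : Int) (h : m = k) :
    (List.range k).map (fun i => m - 1 - Int.ofNat i)
      = ((List.range k).map (fun i => Int.ofNat i)).reverse := by
  apply List.ext_getElem
  · simp
  · intro i h1 h2
    simp only [List.length_map, List.length_range] at h1 h2
    simp only [List.getElem_map, List.getElem_reverse, List.length_map, List.length_range,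
      List.getElem_range]
    simp only [Int.ofNat_eq_natCast]
    subst h
    omega

-- ===== VERDICT =====
theorem zigZagArrays_spec : Claim_equal_zigZagArrays := by
  intro n l r _
  unfold Spec_zigZagArrays zigZagArrays zigZagArrays_alt
  simp only [pv_foldl_sum]

  have hk : (n + 1 - 3).toNat = (n - 2).toNat := by omega
  rw [hk]
  by_cases hpos : r - l + 1 ≤ 0
  · have h0 : (r - l + 1).toNat = 0 := by omega
    simp [h0, hpos, pvLoop_nil]
  · have hne : ((List.range (r - l + 1).toNat).map (fun i => Int.ofNat i)) ≠ [] := by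
      simp only [ne_eq, List.map_eq_nil_iff, List.range_eq_nil]
      omega
    rw [pv_init_rev (r - l + 1).toNat (r - l + 1) (by omega), pvLoop_inv _ _ _ hne]
    simp only [List.sum_reverse, if_neg hpos]
    ring_nf
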